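-- pv_equiv track=rewrite | github.com/Tony-sama/pylfit | tests/examples/sequences_learning/sequence_properties.py | chain_precedence
-- ===== SOURCE A (Python) =====
-- def chain_precedence(events, sequence):
--     features = []
--     values = []
--     for ei in sorted(events):
--         for ej in sorted(events):
--             if(ei == ej):
--                 continue
--             features.append("chain_precedence_"+str(ei)+"_"+str(ej))
--
--             value = True
--             r_sequence = sequence.copy()
--             r_sequence.reverse()
--             for i, e in enumerate(r_sequence):
--                 if(e == ej and (i >= len(r_sequence)-1 or r_sequence[i+1] != ei)):
--                     value = False
--                     break
--             values.append(value)
--     return features, values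
-- ===== SOURCE B (Python) =====
-- def chain_precedence(events, sequence):
--     # One pass: collect each value's set of immediate predecessors (None before
--     # the first element), then each pair is a constant-time subset test.
--     preds = {}
--     prev = None
--     for e in sequence:
--         preds.setdefault(e, set()).add(prev)
--         prev = e
--     features = []
--     values = []
--     ordered = sorted(events)
--     for ei in ordered:
--         for ej in ordered:
--             if ei == ej:
--                 continue
--             features.append("chain_precedence_" + str(ei) + "_" + str(ej))
--             values.append(preds.get(ej, set()) <= {ei})
--     return features, values
-- ===== Notes on version B (the rewrite author's own statement) =====
-- stated objective: faster
-- what changed: Instead of rescanning the reversed sequence once per ordered event pair, B makes a single pass over the sequence collecting each value's set of immediate predecessors (None before the first element) and answers each pair with a subset test against {ei}.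
import Mathlib
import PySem

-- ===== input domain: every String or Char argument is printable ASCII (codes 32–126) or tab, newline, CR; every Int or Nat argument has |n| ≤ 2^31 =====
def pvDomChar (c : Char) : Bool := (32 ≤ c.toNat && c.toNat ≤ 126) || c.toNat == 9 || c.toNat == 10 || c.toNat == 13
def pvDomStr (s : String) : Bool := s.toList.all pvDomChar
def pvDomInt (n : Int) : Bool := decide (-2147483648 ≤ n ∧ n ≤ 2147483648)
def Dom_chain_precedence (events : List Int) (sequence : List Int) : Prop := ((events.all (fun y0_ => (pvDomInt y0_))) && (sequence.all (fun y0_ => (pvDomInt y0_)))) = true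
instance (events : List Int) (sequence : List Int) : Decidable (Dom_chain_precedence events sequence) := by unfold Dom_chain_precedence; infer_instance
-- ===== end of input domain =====

-- B replaces A's per-pair rescans of the sequence with one pass that collects each
-- value's set of immediate predecessors, making each pair a subset test (faster).

-- ===== PORT A =====
-- A's inner 'for i, e in enumerate(r_sequence)' loop with its break, carrying the index i
def chainAInner (ei ej : Int) (r : List Int) : Nat → List Int → Bool
  | _, [] => true
  | i, e :: rest =>
    if e == ej && (decide (i ≥ r.length - 1) || (PySem.List.pyGet? r ((i : Int) + 1) != some ei)) then
      false
    else
      chainAInner ei ej r (i + 1) rest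

def chain_precedence (events : List Int) (sequence : List Int) : List String × List Bool :=
  (PySem.List.sorted events (fun x => x) false).foldl (fun acc ei =>
    (PySem.List.sorted events (fun x => x) false).foldl (fun acc ej =>
      if ei == ej then acc
      else
        let r := sequence.reverse
        (acc.1 ++ ["chain_precedence_" ++ PySem.Int.toStr ei ++ "_" ++ PySem.Int.toStr ej],
         acc.2 ++ [chainAInner ei ej r 0 r])) acc)
    (([], []) : List String × List Bool)

-- ===== PORT B =====
-- the one pass 'for e in sequence: preds.setdefault(e, set()).add(prev); prev = e'
def chainBPreds : Option Int → List Int → PySem.Dict Int (PySem.Set (Option Int)) →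
    PySem.Dict Int (PySem.Set (Option Int))
  | _, [], d => d
  | prev, e :: rest, d =>
    chainBPreds (some e) rest (d.modify e PySem.Set.empty (fun s => PySem.Set.add s prev))

def chain_precedence_alt (events : List Int) (sequence : List Int) : List String × List Bool :=
  let preds := chainBPreds none sequence PySem.Dict.empty
  let ordered := PySem.List.sorted events (fun x => x) false
  ordered.foldl (fun acc ei =>
    ordered.foldl (fun acc ej =>
      if ei == ej then acc
      else
        (acc.1 ++ ["chain_precedence_" ++ PySem.Int.toStr ei ++ "_" ++ PySem.Int.toStr ej],
         acc.2 ++ [PySem.Set.issubset (preds.getD ej PySem.Set.empty)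
                     (PySem.Set.ofList [some ei])])) acc)
    (([], []) : List String × List Bool)

-- ===== PRECONDITION & SPEC =====
def Spec_chain_precedence (events : List Int) (sequence : List Int) (out : List String × List Bool) : Prop := out = chain_precedence_alt events sequence
instance (events : List Int) (sequence : List Int) (out : List String × List Bool) : Decidable (Spec_chain_precedence events sequence out) := by unfold Spec_chain_precedence; infer_instance

-- ===== CLAIM (what is proved, stated in full; the proofs are below) =====
def Claim_equal_chain_precedence : Prop := ∀ (events : List Int) (sequence : List Int), Dom_chain_precedence events sequence → Spec_chain_precedence events sequence (chain_precedence events sequence)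

-- ===== LEMMAS AND PROOFS =====

-- forward scan with the previous element, the common reference point of both sides
def okFwd (ei ej : Int) : Option Int → List Int → Bool
  | _, [] => true
  | prev, e :: rest => (!(e == ej) || (prev == some ei)) && okFwd ei ej (some e) rest

-- pair scan of a list via head of the tail (A's reversed scan, without indices)
def okRev (ei ej : Int) : List Int → Bool
  | [] => true
  | e :: rest => (!(e == ej) || (rest.head? == some ei)) && okRev ei ej rest

theorem chainAInner_eq_okRev (ei ej : Int) (r : List Int) :
    ∀ (t : List Int) (i : Nat), r.drop i = t → chainAInner ei ej r i t = okRev ei ej t := by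
  intro t
  induction t with
  | nil => intro i h; rfl
  | cons e rest ih =>
    intro i h
    have hi : i < r.length := by
      by_contra hge
      simp [List.drop_eq_nil_of_le (Nat.le_of_not_lt hge)] at h
    have hdrop1 : r.drop (i + 1) = rest := by
      have := congrArg (List.drop 1) h
      simpa [List.drop_drop, Nat.add_comm] using this
    have hget : PySem.List.pyGet? r ((i : Int) + 1) = rest.head? := by
      have hcast : ((i : Int) + 1) = ((i + 1 : Nat) : Int) := by push_cast; ring
      rw [hcast, PySem.List.pyGet?_natCast, ← List.head?_drop, hdrop1]
    have hlen : r.length - i = rest.length + 1 := by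
      have := congrArg List.length h
      simpa [List.length_drop] using this
    have hstep : chainAInner ei ej r i (e :: rest) =
        if e == ej && (decide (i ≥ r.length - 1) || (PySem.List.pyGet? r ((i : Int) + 1) != some ei))
        then false else chainAInner ei ej r (i + 1) rest := rfl
    rw [hstep, hget, ih (i + 1) hdrop1]
    rcases rest with _ | ⟨x, t'⟩
    · have hge : i ≥ r.length - 1 := by simp at hlen; omega
      by_cases he : e = ej <;> simp [okRev, he, hge]
    · have hlt : ¬ (i ≥ r.length - 1) := by simp at hlen ⊢; omega
      by_cases he : e = ej <;> by_cases hx : x = ei <;> simp [okRev, he, hx, hlt]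

-- cons characterisation of the pair property okRev decides
theorem pairProp_cons (ei ej e : Int) (rest : List Int) :
    (∀ i : Nat, (e :: rest)[i]? = some ej → (e :: rest)[i + 1]? = some ei) ↔
      ((e = ej → rest.head? = some ei) ∧
        ∀ i : Nat, rest[i]? = some ej → rest[i + 1]? = some ei) := by
  constructor
  · intro h
    refine ⟨fun he => ?_, fun i hi => ?_⟩
    · have := h 0 (by simp [he])
      simpa [List.head?_eq_getElem?] using this
    · have := h (i + 1) (by simpa using hi)
      simpa using this
  · rintro ⟨h1, h2⟩ i hi
    cases i with
    | zero =>
      simp at hi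
      simpa [List.head?_eq_getElem?] using h1 hi
    | succ k =>
      simp only [List.getElem?_cons_succ] at hi ⊢
      exact h2 k hi

-- index characterisation of okRev
theorem okRev_iff (ei ej : Int) (l : List Int) :
    okRev ei ej l = true ↔ ∀ i : Nat, l[i]? = some ej → l[i + 1]? = some ei := by
  induction l with
  | nil => simp [okRev]
  | cons e rest ih =>
    rw [okRev, Bool.and_eq_true, ih, pairProp_cons]
    apply and_congr_left'
    simp [imp_iff_not_or]

-- cons characterisation of the predecessor property okFwd decides
theorem prevProp_cons (ei ej e : Int) (rest : List Int) (prev : Option Int) :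
    (∀ i : Nat, (e :: rest)[i]? = some ej →
        (if i = 0 then prev else (e :: rest)[i - 1]?) = some ei) ↔
      ((e = ej → prev = some ei) ∧
        ∀ i : Nat, rest[i]? = some ej → (if i = 0 then some e else rest[i - 1]?) = some ei) := by
  constructor
  · intro h
    refine ⟨fun he => by simpa using h 0 (by simp [he]), fun i hi => ?_⟩
    have := h (i + 1) (by simpa using hi)
    cases i with
    | zero => simpa using this
    | succ k => simpa [Nat.succ_sub_one] using this
  · rintro ⟨h1, h2⟩ i hi
    cases i with
    | zero =>
      simp at hi
      simpa using h1 hi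
    | succ k =>
      simp only [List.getElem?_cons_succ] at hi
      have := h2 k hi
      cases k with
      | zero => simpa using this
      | succ m => simpa [Nat.succ_sub_one] using this

-- index characterisation of okFwd
theorem okFwd_iff (ei ej : Int) (s : List Int) :
    ∀ prev : Option Int, okFwd ei ej prev s = true ↔
      ∀ i : Nat, s[i]? = some ej → (if i = 0 then prev else s[i - 1]?) = some ei := by
  induction s with
  | nil => intro prev; simp [okFwd]
  | cons e rest ih =>
    intro prev
    rw [okFwd, Bool.and_eq_true, ih, prevProp_cons]
    apply and_congr_left'
    simp [imp_iff_not_or]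

-- the reversed pair scan equals the forward scan started with no predecessor
theorem okRev_reverse (ei ej : Int) (s : List Int) :
    okRev ei ej s.reverse = okFwd ei ej none s := by
  rw [Bool.eq_iff_iff, okRev_iff, okFwd_iff]
  constructor
  · intro h i hi
    have hilen : i < s.length := by
      by_contra hge
      rw [List.getElem?_eq_none (Nat.le_of_not_lt hge)] at hi
      simp at hi
    cases i with
    | zero =>
      exfalso
      have h1 : s.reverse[s.length - 1]? = some ej := by
        rw [List.getElem?_reverse (by omega)]
        simpa [Nat.sub_sub_self] using hi
      have h2 := h _ h1
      rw [List.getElem?_eq_none (by simp; omega)] at h2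
      simp at h2
    | succ k =>
      have h1 : s.reverse[s.length - 1 - (k + 1)]? = some ej := by
        rw [List.getElem?_reverse (by omega)]
        have heq : s.length - 1 - (s.length - 1 - (k + 1)) = k + 1 := by omega
        rw [heq]; exact hi
      have h2 := h _ h1
      rw [List.getElem?_reverse (by omega)] at h2
      have heq : s.length - 1 - (s.length - 1 - (k + 1) + 1) = k := by omega
      rw [heq] at h2
      rw [if_neg (Nat.succ_ne_zero k)]
      simpa using h2
  · intro h i hi
    have hilen : i < s.length := by
      by_contra hge
      rw [List.getElem?_eq_none (by simp; omega)] at hi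
      simp at hi
    rw [List.getElem?_reverse hilen] at hi
    have h2 := h _ hi
    by_cases h0 : s.length - 1 - i = 0
    · rw [if_pos h0] at h2
      simp at h2
    · rw [if_neg h0] at h2
      rw [List.getElem?_reverse (by omega)]
      have heq : s.length - 1 - (i + 1) = s.length - 1 - i - 1 := by omega
      rw [heq]
      exact h2

-- subset test against a singleton, after adding one element to a set
theorem issubset_add_singleton (s : PySem.Set (Option Int)) (x v : Option Int) :
    PySem.Set.issubset (PySem.Set.add s x) (PySem.Set.ofList [v]) =
      (PySem.Set.issubset s (PySem.Set.ofList [v]) && (x == v)) := by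
  rw [Bool.eq_iff_iff, Bool.and_eq_true, PySem.Set.issubset_iff, PySem.Set.issubset_iff]
  simp only [PySem.Set.mem_add, PySem.Set.mem_ofList, List.mem_singleton, beq_iff_eq]
  constructor
  · intro h
    exact ⟨fun y hy => h y (Or.inl hy), h x (Or.inr rfl)⟩
  · rintro ⟨h1, h2⟩ y hy
    rcases hy with hy | hy
    · exact h1 y hy
    · rw [hy]; exact h2

-- B's one pass, accumulated: the subset test over the final dict splits into the
-- test over the starting dict and the forward scan of the remaining sequence
theorem chainBPreds_sub (ei ej : Int) (s : List Int) :
    ∀ (prev : Option Int) (d : PySem.Dict Int (PySem.Set (Option Int))),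
      PySem.Set.issubset ((chainBPreds prev s d).getD ej PySem.Set.empty)
          (PySem.Set.ofList [some ei]) =
        (PySem.Set.issubset (d.getD ej PySem.Set.empty) (PySem.Set.ofList [some ei]) &&
          okFwd ei ej prev s) := by
  induction s with
  | nil => intro prev d; simp [chainBPreds, okFwd]
  | cons e rest ih =>
    intro prev d
    have hstep : chainBPreds prev (e :: rest) d =
        chainBPreds (some e) rest (d.modify e PySem.Set.empty (fun s => PySem.Set.add s prev)) :=
      rfl
    rw [hstep, ih]
    by_cases he : ej = e
    · subst he
      rw [PySem.Dict.getD_modify_self, issubset_add_singleton, okFwd]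
      simp [Bool.and_assoc]
    · rw [PySem.Dict.getD_modify_of_ne _ _ _ he, okFwd]
      have hne : (e == ej) = false := by
        simp only [beq_eq_false_iff_ne, ne_eq]
        exact fun hh => he hh.symm
      simp [hne]

-- the per-pair values of A and B coincide
theorem value_eq (ei ej : Int) (sequence : List Int) :
    chainAInner ei ej sequence.reverse 0 sequence.reverse =
      PySem.Set.issubset ((chainBPreds none sequence PySem.Dict.empty).getD ej PySem.Set.empty)
        (PySem.Set.ofList [some ei]) := by
  rw [chainAInner_eq_okRev ei ej _ _ 0 (by simp), okRev_reverse, chainBPreds_sub]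
  have hemp : PySem.Set.issubset (PySem.Dict.empty.getD ej PySem.Set.empty)
      (PySem.Set.ofList [some ei]) = true := by
    rw [PySem.Dict.getD_empty, PySem.Set.issubset_iff]
    simp [PySem.Set.empty]
  rw [hemp, Bool.true_and]

-- ===== VERDICT (by name: the statement is the Claim_ definition above) =====
theorem chain_precedence_spec : Claim_equal_chain_precedence := by
  intro events sequence _
  simp only [Spec_chain_precedence, chain_precedence, chain_precedence_alt]
  apply List.foldl_ext
  intro acc ei _
  apply List.foldl_ext
  intro acc2 ej _
  by_cases he : ei = ej
  · simp [he]
  · have hne : (ei == ej) = false := by simp [he]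
    simp only [hne, Bool.false_eq_true, if_false, value_eq]
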